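-- pv_equiv track=rewrite | github.com/Mongkol39541/Python | KMITL/Q9.py | calculate
-- ===== SOURCE A (Python) =====
-- def calculate(axis_int2d, table_2d):
--     """This is DocString"""
--     for row in range(len(table_2d)):
--         for column in range(len(table_2d[row])):
--             for num in axis_int2d:
--                 if row == num[0] and column == num[1]:
--                     if row != 0:
--                         val_n = table_2d[row - 1][column]
--                         table_2d[row - 1][column] = val_n + 1
--                         if column != 0:
--                             val_n = table_2d[row - 1][column - 1]
--                             table_2d[row - 1][column - 1] = val_n + 1
--                         if column != (len(table_2d) - 1):
--                             val_n = table_2d[row - 1][column + 1]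
--                             table_2d[row - 1][column + 1] = val_n + 1
--                     if row != (len(table_2d) - 1):
--                         val_s = table_2d[row + 1][column]
--                         table_2d[row + 1][column] = val_s + 1
--                         if column != 0:
--                             val_s = table_2d[row + 1][column - 1]
--                             table_2d[row + 1][column - 1] = val_s + 1
--                         if column != (len(table_2d) - 1):
--                             val_s = table_2d[row + 1][column + 1]
--                             table_2d[row + 1][column + 1] = val_s + 1
--                     if column != 0:
--                         val_e = table_2d[row][column - 1]
--                         table_2d[row][column - 1] = val_e + 1
--                     if column != (len(table_2d) - 1):
--                         val_w = table_2d[row][column + 1]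
--                         table_2d[row][column + 1] = val_w + 1
--     return table_2d
-- ===== SOURCE B (Python) =====
-- def calculate(axis_int2d, table_2d):
--     """Iterate directly over the marked points instead of scanning every grid cell."""
--     rows = len(table_2d)
--     offsets = [(-1, 0), (-1, -1), (-1, 1), (1, 0), (1, -1), (1, 1), (0, -1), (0, 1)]
--     for num in axis_int2d:
--         if len(num) < 2:
--             continue
--         r, c = num[0], num[1]
--         if 0 <= r < rows and 0 <= c < len(table_2d[r]):
--             for dr, dc in offsets:
--                 if dr == -1 and r == 0:
--                     continue
--                 if dr == 1 and r == rows - 1: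
--                     continue
--                 if dc == -1 and c == 0:
--                     continue
--                 if dc == 1 and c == rows - 1:
--                     continue
--                 table_2d[r + dr][c + dc] += 1
--     return table_2d
-- ===== Notes on version B (the rewrite author's own statement) =====
-- stated objective: faster
-- what changed: Instead of scanning every grid cell and, per cell, every axis point (O(R*C*A)), B iterates once over the axis points and increments the in-grid neighbors directly, keeping A's original bounds checks (including the column-vs-row-count check).
import Mathlib
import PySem

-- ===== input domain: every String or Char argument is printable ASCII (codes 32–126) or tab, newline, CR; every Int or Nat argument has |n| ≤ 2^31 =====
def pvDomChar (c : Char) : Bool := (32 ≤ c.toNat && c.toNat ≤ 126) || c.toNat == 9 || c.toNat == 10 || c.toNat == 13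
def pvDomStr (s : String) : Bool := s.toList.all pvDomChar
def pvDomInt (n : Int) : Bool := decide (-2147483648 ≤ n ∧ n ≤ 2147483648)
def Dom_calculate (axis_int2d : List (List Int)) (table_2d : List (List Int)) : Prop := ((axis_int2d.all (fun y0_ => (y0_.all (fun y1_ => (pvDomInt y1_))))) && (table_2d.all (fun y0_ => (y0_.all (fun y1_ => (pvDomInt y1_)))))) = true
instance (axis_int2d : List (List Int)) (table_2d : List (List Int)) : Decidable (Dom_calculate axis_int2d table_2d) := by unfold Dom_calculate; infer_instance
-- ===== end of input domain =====

-- B iterates once over the marked points and increments in-grid neighbors directly (with A's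
-- original bounds checks), instead of A's scan of every grid cell against every marked point.
-- Both programs mutate table_2d in place in Python; the equivalence proved here is about the
-- returned value (B performs the same mutation).

-- shared primitive: table[i][j] += 1 (in-range writes only; Python's raising out-of-range
-- accesses are excluded by Pre_calculate, where List.modify instead no-ops)
def bump (t : List (List Int)) (i j : Nat) : List (List Int) :=
  t.modify i (fun row => row.modify j (· + 1))

-- ===== PORT A =====
def stepA (t : List (List Int)) (row col : Nat) (num : List Int) : List (List Int) :=
  if PySem.List.pyGet? num 0 = some (row : Int) ∧ PySem.List.pyGet? num 1 = some (col : Int) then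
    let t1 := if row ≠ 0 then
        let ta := bump t (row - 1) col
        let tb := if col ≠ 0 then bump ta (row - 1) (col - 1) else ta
        if col ≠ tb.length - 1 then bump tb (row - 1) (col + 1) else tb
      else t
    let t2 := if row ≠ t1.length - 1 then
        let ta := bump t1 (row + 1) col
        let tb := if col ≠ 0 then bump ta (row + 1) (col - 1) else ta
        if col ≠ tb.length - 1 then bump tb (row + 1) (col + 1) else tb
      else t1
    let t3 := if col ≠ 0 then bump t2 row (col - 1) else t2
    if col ≠ t3.length - 1 then bump t3 row (col + 1) else t3
  else t

def calculate (axis_int2d : List (List Int)) (table_2d : List (List Int)) : List (List Int) :=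
  (List.range table_2d.length).foldl
    (fun t row =>
      (List.range (t.getD row []).length).foldl
        (fun t col => axis_int2d.foldl (fun t num => stepA t row col num) t) t)
    table_2d

-- ===== PORT B =====
def offsetsB : List (Int × Int) := [(-1, 0), (-1, -1), (-1, 1), (1, 0), (1, -1), (1, 1), (0, -1), (0, 1)]

def stepB (R r c : Int) (t : List (List Int)) (d : Int × Int) : List (List Int) :=
  if (d.1 = -1 ∧ r = 0) ∨ (d.1 = 1 ∧ r = R - 1) ∨ (d.2 = -1 ∧ c = 0) ∨ (d.2 = 1 ∧ c = R - 1) then t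
  else bump t (r + d.1).toNat (c + d.2).toNat

def calculate_alt (axis_int2d : List (List Int)) (table_2d : List (List Int)) : List (List Int) :=
  axis_int2d.foldl
    (fun t num =>
      match num with
      | n0 :: n1 :: _ =>
        if 0 ≤ n0 ∧ n0 < (table_2d.length : Int) ∧ 0 ≤ n1 ∧ n1 < ((t.getD n0.toNat []).length : Int) then
          offsetsB.foldl (stepB (table_2d.length : Int) n0 n1) t
        else t
      | _ => t)
    table_2d

-- ===== PRECONDITION & SPEC =====
-- Pre_calculate holds exactly when Python A returns normally: it excludes only inputs on which A
-- raises IndexError — an axis entry with fewer than 2 coordinates that the cell scan reaches, or a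
-- matched point whose neighbor write overruns a (ragged or right-edge) row.
def pvSafeNum (t : List (List Int)) (num : List Int) : Bool :=
  match num with
  | [] => false
  | [n0] => !(decide (0 ≤ n0 ∧ n0 < (t.length : Int)) && ((t.getD n0.toNat []).length != 0))
  | n0 :: n1 :: _ =>
    if 0 ≤ n0 ∧ n0 < (t.length : Int) ∧ 0 ≤ n1 ∧ n1 < ((t.getD n0.toNat []).length : Int) then
      decide (
        (n0.toNat ≠ 0 →
          n1.toNat < (t.getD (n0.toNat - 1) []).length ∧
          (n1.toNat ≠ t.length - 1 → n1.toNat + 1 < (t.getD (n0.toNat - 1) []).length)) ∧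
        (n0.toNat ≠ t.length - 1 →
          n1.toNat < (t.getD (n0.toNat + 1) []).length ∧
          (n1.toNat ≠ t.length - 1 → n1.toNat + 1 < (t.getD (n0.toNat + 1) []).length)) ∧
        (n1.toNat ≠ t.length - 1 → n1.toNat + 1 < (t.getD n0.toNat []).length))
    else true

def Pre_calculate (axis_int2d : List (List Int)) (table_2d : List (List Int)) : Prop :=
  (∃ r ∈ List.range table_2d.length, (table_2d.getD r []).length ≠ 0) →
  ∀ num ∈ axis_int2d, pvSafeNum table_2d num = true

instance (axis_int2d : List (List Int)) (table_2d : List (List Int)) : Decidable (Pre_calculate axis_int2d table_2d) := by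
  unfold Pre_calculate; infer_instance

def pvWitness_calculate : List (List Int) × List (List Int) :=
  ([[0, 1], [2, 2]], [[0, 0, 0], [0, 0, 0], [0, 0, 0]])

def Spec_calculate (axis_int2d : List (List Int)) (table_2d : List (List Int)) (out : List (List Int)) : Prop := out = calculate_alt axis_int2d table_2d
instance (axis_int2d : List (List Int)) (table_2d : List (List Int)) (out : List (List Int)) : Decidable (Spec_calculate axis_int2d table_2d out) := by unfold Spec_calculate; infer_instance

-- ===== CLAIM (what is proved, stated in full; the proofs are below) =====
def Claim_equal_calculate : Prop := ∀ (axis_int2d : List (List Int)) (table_2d : List (List Int)), Dom_calculate axis_int2d table_2d → Pre_calculate axis_int2d table_2d → Spec_calculate axis_int2d table_2d (calculate axis_int2d table_2d)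

-- ===== LEMMAS AND PROOFS =====

-- apply a list of (row, col) bumps left to right
def bumps (ps : List (Nat × Nat)) (t : List (List Int)) : List (List Int) :=
  ps.foldl (fun t p => bump t p.1 p.2) t

-- the guarded neighbor positions of a marked point, in A's (= B's) order
def P8 (R n0 n1 : Int) : List (Nat × Nat) :=
  (if n0 ≠ 0 then
      [((n0 - 1).toNat, n1.toNat)] ++
      (if n1 ≠ 0 then [((n0 - 1).toNat, (n1 - 1).toNat)] else []) ++
      (if n1 ≠ R - 1 then [((n0 - 1).toNat, (n1 + 1).toNat)] else [])
    else []) ++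
  (if n0 ≠ R - 1 then
      [((n0 + 1).toNat, n1.toNat)] ++
      (if n1 ≠ 0 then [((n0 + 1).toNat, (n1 - 1).toNat)] else []) ++
      (if n1 ≠ R - 1 then [((n0 + 1).toNat, (n1 + 1).toNat)] else [])
    else []) ++
  (if n1 ≠ 0 then [(n0.toNat, (n1 - 1).toNat)] else []) ++
  (if n1 ≠ R - 1 then [(n0.toNat, (n1 + 1).toNat)] else [])

-- per-num positions, computed from the (invariant) shape
def QB (R : Nat) (Ls : List Nat) (num : List Int) : List (Nat × Nat) :=
  match num with
  | n0 :: n1 :: _ =>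
    if 0 ≤ n0 ∧ n0 < (R : Int) ∧ 0 ≤ n1 ∧ n1 < ((Ls.getD n0.toNat 0 : Nat) : Int) then
      P8 (R : Int) n0 n1
    else []
  | _ => []

lemma length_bump (t : List (List Int)) (i j : Nat) : (bump t i j).length = t.length := by
  simp [bump]

lemma shape_bump (t : List (List Int)) (i j : Nat) :
    (bump t i j).map List.length = t.map List.length := by
  apply List.ext_getElem?
  intro k
  simp only [List.getElem?_map, bump, List.getElem?_modify]
  cases t[k]? with
  | none => rfl
  | some row => by_cases h : i = k <;> simp [h, List.length_modify]

lemma bumps_append (ps qs : List (Nat × Nat)) (t : List (List Int)) :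
    bumps (ps ++ qs) t = bumps qs (bumps ps t) := by
  simp [bumps, List.foldl_append]

lemma shape_bumps (ps : List (Nat × Nat)) (t : List (List Int)) :
    (bumps ps t).map List.length = t.map List.length := by
  induction ps generalizing t with
  | nil => rfl
  | cons p ps ih => simpa [bumps, List.foldl_cons] using (ih (bump t p.1 p.2)).trans (shape_bump t p.1 p.2)

lemma length_bumps (ps : List (Nat × Nat)) (t : List (List Int)) :
    (bumps ps t).length = t.length := by
  have := congrArg List.length (shape_bumps ps t); simpa using this

lemma modify_add_comm (l : List Int) (j j' : Nat) :
    (l.modify j (· + 1)).modify j' (· + 1) = (l.modify j' (· + 1)).modify j (· + 1) := by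
  apply List.ext_getElem?
  intro n
  simp only [List.getElem?_modify]
  cases l[n]? with
  | none => rfl
  | some v => by_cases h1 : j = n <;> by_cases h2 : j' = n <;> simp [h1, h2]

lemma bump_comm (t : List (List Int)) (i j i' j' : Nat) :
    bump (bump t i j) i' j' = bump (bump t i' j') i j := by
  apply List.ext_getElem?
  intro n
  simp only [bump, List.getElem?_modify]
  cases t[n]? with
  | none => rfl
  | some row => by_cases h1 : i = n <;> by_cases h2 : i' = n <;> simp [h1, h2, modify_add_comm]

lemma rowlen_of_shape {t : List (List Int)} {Ls : List Nat} (h : t.map List.length = Ls) (r : Nat) :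
    (t.getD r []).length = Ls.getD r 0 := by
  rw [← h]
  exact (List.getD_map t [] List.length).symm

-- generic: fold of "apply a t-independent bump list per element" is one flatMap
lemma foldl_bumps {α : Type} (l : List α) (g : α → List (Nat × Nat)) (t : List (List Int)) :
    l.foldl (fun t x => bumps (g x) t) t = bumps (l.flatMap g) t := by
  induction l generalizing t with
  | nil => rfl
  | cons a l ih => simp [List.foldl_cons, List.flatMap_cons, bumps_append, ih]

-- fold congruence under an invariant
lemma foldl_congr_inv {α β : Type} (l : List α) (f g : β → α → β) (I : β → Prop)
    (hf : ∀ b a, a ∈ l → I b → I (f b a))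
    (h : ∀ b a, a ∈ l → I b → f b a = g b a) :
    ∀ b, I b → l.foldl f b = l.foldl g b := by
  induction l with
  | nil => intro b _; rfl
  | cons a l ih =>
    intro b hb
    simp only [List.foldl_cons]
    rw [← h b a (by simp) hb]
    exact ih (fun b x hx hI => hf b x (by simp [hx]) hI)
      (fun b x hx hI => h b x (by simp [hx]) hI) _ (hf b a (by simp) hb)

lemma pyGet?_nil_int (k : Int) : PySem.List.pyGet? ([] : List Int) k = none := by
  rw [PySem.List.pyGet?_eq_none_iff]
  unfold PySem.Raise.InRange
  simp

lemma pyGet?_single_one (n0 : Int) : PySem.List.pyGet? [n0] 1 = none := by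
  simp [PySem.List.pyGet?_of_nonneg]

-- A's per-(cell,num) step as a bump list (R ≥ 1 because a cell exists)
set_option maxHeartbeats 2000000 in
lemma stepA_eq (t : List (List Int)) (row col : Nat) (num : List Int) (hR : 1 ≤ t.length) :
    stepA t row col num =
      if PySem.List.pyGet? num 0 = some (row : Int) ∧ PySem.List.pyGet? num 1 = some (col : Int)
      then bumps (P8 (t.length : Int) (row : Int) (col : Int)) t else t := by
  by_cases hm : PySem.List.pyGet? num 0 = some (row : Int) ∧ PySem.List.pyGet? num 1 = some (col : Int)
  · rw [if_pos hm]
    have c1 : ((row : Int) = (t.length : Int) - 1) = (row = t.length - 1) := by apply propext; omega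
    have c2 : ((col : Int) = (t.length : Int) - 1) = (col = t.length - 1) := by apply propext; omega
    have c0 : ((row : Int) = 0) = (row = 0) := by apply propext; omega
    have c3 : ((col : Int) = 0) = (col = 0) := by apply propext; omega
    have e1 : ((row : Int) - 1).toNat = row - 1 := by omega
    have e2 : ((row : Int) + 1).toNat = row + 1 := by omega
    have e3 : ((col : Int) - 1).toNat = col - 1 := by omega
    have e4 : ((col : Int) + 1).toNat = col + 1 := by omega
    have e5 : ((row : Int)).toNat = row := by omega
    have e6 : ((col : Int)).toNat = col := by omega
    simp only [stepA, if_pos hm, P8, ne_eq, c0, c1, c2, c3, e1, e2, e3, e4, e5, e6]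
    simp only [apply_ite List.length, length_bump, ite_self]
    split_ifs <;> simp [bumps]
  · rw [if_neg hm]
    simp [stepA, hm]

-- B's offset fold as the same bump list
set_option maxHeartbeats 1000000 in
lemma stepB_fold_eq (R n0 n1 : Int) (t : List (List Int)) :
    offsetsB.foldl (stepB R n0 n1) t = bumps (P8 R n0 n1) t := by
  have e1 : (n0 + -1 : Int) = n0 - 1 := by ring
  have e2 : (n1 + -1 : Int) = n1 - 1 := by ring
  by_cases h0 : n0 = 0 <;> by_cases h1 : n0 = R - 1 <;> by_cases h2 : n1 = 0 <;> by_cases h3 : n1 = R - 1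
  · simp [offsetsB, stepB, P8, bumps, eq_true h0, eq_true h1, eq_true h2, eq_true h3]
  · simp [offsetsB, stepB, P8, bumps, eq_true h0, eq_true h1, eq_true h2, eq_false h3]
  · simp [offsetsB, stepB, P8, bumps, e2, eq_true h0, eq_true h1, eq_false h2, eq_true h3]
  · simp [offsetsB, stepB, P8, bumps, e2, eq_true h0, eq_true h1, eq_false h2, eq_false h3]
  · simp [offsetsB, stepB, P8, bumps, eq_true h0, eq_false h1, eq_true h2, eq_true h3]
  · simp [offsetsB, stepB, P8, bumps, eq_true h0, eq_false h1, eq_true h2, eq_false h3]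
  · simp [offsetsB, stepB, P8, bumps, e2, eq_true h0, eq_false h1, eq_false h2, eq_true h3]
  · simp [offsetsB, stepB, P8, bumps, e2, eq_true h0, eq_false h1, eq_false h2, eq_false h3]
  · simp [offsetsB, stepB, P8, bumps, e1, eq_false h0, eq_true h1, eq_true h2, eq_true h3]
  · simp [offsetsB, stepB, P8, bumps, e1, eq_false h0, eq_true h1, eq_true h2, eq_false h3]
  · simp [offsetsB, stepB, P8, bumps, e1, e2, eq_false h0, eq_true h1, eq_false h2, eq_true h3]
  · simp [offsetsB, stepB, P8, bumps, e1, e2, eq_false h0, eq_true h1, eq_false h2, eq_false h3]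
  · simp [offsetsB, stepB, P8, bumps, e1, eq_false h0, eq_false h1, eq_true h2, eq_true h3]
  · simp [offsetsB, stepB, P8, bumps, e1, eq_false h0, eq_false h1, eq_true h2, eq_false h3]
  · simp [offsetsB, stepB, P8, bumps, e1, e2, eq_false h0, eq_false h1, eq_false h2, eq_true h3]
  · simp [offsetsB, stepB, P8, bumps, e1, e2, eq_false h0, eq_false h1, eq_false h2, eq_false h3]

-- collapse a range-flatMap that is nonempty at a single integer key
lemma range_flatMap_ite {γ : Type} (n : Nat) (key : Int) (g : Nat → List γ) :
    (List.range n).flatMap (fun (i : Nat) => if key = (i : Int) then g i else []) =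
      if 0 ≤ key ∧ key < (n : Int) then g key.toNat else [] := by
  induction n with
  | zero => rw [if_neg (by omega)]; rfl
  | succ n ih =>
    rw [List.range_succ, List.flatMap_append, ih]
    simp only [List.flatMap_cons, List.flatMap_nil, List.append_nil]
    by_cases hk : key = (n : Int)
    · have hykey : key.toNat = n := by omega
      rw [if_neg (by omega), if_pos hk, if_pos (by constructor <;> omega), hykey]
      simp
    · rw [if_neg hk]
      by_cases hlt : 0 ≤ key ∧ key < (n : Int)
      · rw [if_pos hlt, if_pos (by push_cast at hlt ⊢; omega)]
        simp
      · rw [if_neg hlt, if_neg (by push_cast at hlt ⊢; omega)]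
        simp

-- interleaved flatMap splits, up to permutation
lemma flatMap_append_perm {α γ : Type} (m : List α) (g h : α → List γ) :
    (m.flatMap fun b => g b ++ h b).Perm (m.flatMap g ++ m.flatMap h) := by
  induction m with
  | nil => simp
  | cons b m ih =>
    simp only [List.flatMap_cons, List.append_assoc]
    refine ((ih.append_left _).append_left _).trans (List.Perm.append_left (g b) ?_)
    have h1 : (h b ++ (m.flatMap g ++ m.flatMap h)).Perm ((h b ++ m.flatMap g) ++ m.flatMap h) := by
      rw [List.append_assoc]
    have h2 : ((h b ++ m.flatMap g) ++ m.flatMap h).Perm ((m.flatMap g ++ h b) ++ m.flatMap h) :=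
      List.perm_append_comm.append_right _
    refine (h1.trans h2).trans ?_
    rw [List.append_assoc]

lemma flatMap_swap_perm {α β γ : Type} (l : List α) (m : List β) (f : α → β → List γ) :
    (l.flatMap fun a => m.flatMap (f a)).Perm (m.flatMap fun b => l.flatMap fun a => f a b) := by
  induction l with
  | nil => simp
  | cons a l ih =>
    simp only [List.flatMap_cons]
    refine (List.Perm.append_left _ ih).trans (flatMap_append_perm m _ _).symm

-- A's per-(cell, num) contribution as a bump list
def fI (R : Int) (row col : Nat) (num : List Int) : List (Nat × Nat) :=
  if PySem.List.pyGet? num 0 = some (row : Int) ∧ PySem.List.pyGet? num 1 = some (col : Int) then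
    P8 R (row : Int) (col : Int)
  else []

-- A's whole-row contribution
def GA (R : Nat) (Ls : List Nat) (axis : List (List Int)) (row : Nat) : List (Nat × Nat) :=
  (List.range (Ls.getD row 0)).flatMap (fun col => axis.flatMap (fI (R : Int) row col))

lemma axisfold_eq (axis : List (List Int)) (row col : Nat) (R : Nat) (hR : 1 ≤ R) :
    ∀ t, t.length = R →
      axis.foldl (fun t num => stepA t row col num) t
        = bumps (axis.flatMap (fI (R : Int) row col)) t := by
  induction axis with
  | nil => intro t ht; rfl
  | cons num rest ih =>
    intro t ht
    simp only [List.foldl_cons, List.flatMap_cons, bumps_append]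
    rw [stepA_eq t row col num (by omega), ht]
    unfold fI
    by_cases hm : PySem.List.pyGet? num 0 = some (row : Int) ∧ PySem.List.pyGet? num 1 = some (col : Int)
    · rw [if_pos hm, if_pos hm]
      exact ih _ (by rw [length_bumps, ht])
    · rw [if_neg hm, if_neg hm]
      exact ih _ ht

lemma colfold_eq (axis : List (List Int)) (row : Nat) (R : Nat) (Ls : List Nat)
    (hLsR : Ls.length = R) (hrow : row < R) :
    ∀ t, t.map List.length = Ls →
      (List.range ((t.getD row []).length)).foldl
        (fun t col => axis.foldl (fun t num => stepA t row col num) t) t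
      = bumps (GA R Ls axis row) t := by
  intro t hI
  rw [rowlen_of_shape hI row]
  have hag : ∀ (b : List (List Int)) (col : Nat), col ∈ List.range (Ls.getD row 0) →
      b.map List.length = Ls →
      axis.foldl (fun t num => stepA t row col num) b = bumps (axis.flatMap (fI (R : Int) row col)) b := by
    intro b col _ hIb
    exact axisfold_eq axis row col R (by omega) b (by rw [← hLsR, ← hIb, List.length_map])
  rw [foldl_congr_inv _ _ (fun t col => bumps (axis.flatMap (fI (R : Int) row col)) t)
      (fun t => t.map List.length = Ls)
      (fun b a ha hb => by rw [hag b a ha hb]; exact (shape_bumps _ _).trans hb)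
      hag t hI]
  rw [foldl_bumps]
  rfl

-- collapse A's double cell scan for one marked point
lemma collapse_num (R : Nat) (Ls : List Nat) (num : List Int) :
    ((List.range R).flatMap
      (fun row => (List.range (Ls.getD row 0)).flatMap (fun col => fI (R : Int) row col num)))
      = QB R Ls num := by
  rcases num with _ | ⟨n0, rest⟩
  · simp [fI, QB, pyGet?_nil_int, List.flatMap_eq_nil_iff]
  rcases rest with _ | ⟨n1, rest⟩
  · simp [fI, QB, pyGet?_single_one, List.flatMap_eq_nil_iff]
  have hfI : ∀ row col : Nat,
      fI (R : Int) row col (n0 :: n1 :: rest)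
        = if n0 = (row : Int) ∧ n1 = (col : Int) then P8 (R : Int) (row : Int) (col : Int) else [] := by
    intro row col
    simp [fI]
  simp only [hfI]
  have hinner : ∀ row : Nat,
      (List.range (Ls.getD row 0)).flatMap
        (fun (col : Nat) => if n0 = (row : Int) ∧ n1 = ((col : Nat) : Int) then P8 (R : Int) (row : Int) (col : Int) else [])
        = if n0 = (row : Int) then
            (if 0 ≤ n1 ∧ n1 < ((Ls.getD row 0 : Nat) : Int) then P8 (R : Int) (row : Int) n1 else [])
          else [] := by
    intro row
    by_cases h : n0 = (row : Int)
    · rw [if_pos h]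
      have hfun : ∀ col : Nat,
          (if n0 = (row : Int) ∧ n1 = ((col : Nat) : Int) then P8 (R : Int) (row : Int) (col : Int) else [])
            = (if n1 = (col : Int) then P8 (R : Int) (row : Int) (col : Int) else []) := by
        intro col
        by_cases hc : n1 = (col : Int)
        · rw [if_pos ⟨h, hc⟩, if_pos hc]
        · rw [if_neg (by tauto), if_neg hc]
      have heq := List.flatMap_congr (l := List.range (Ls.getD row 0)) (fun col _ => hfun col)
      rw [heq, range_flatMap_ite (Ls.getD row 0) n1 (fun (col : Nat) => P8 (R : Int) (row : Int) (col : Int))]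
      by_cases hb : 0 ≤ n1 ∧ n1 < ((Ls.getD row 0 : Nat) : Int)
      · rw [if_pos hb, if_pos hb, Int.toNat_of_nonneg hb.1]
      · rw [if_neg hb, if_neg hb]
    · rw [if_neg h]
      apply List.flatMap_eq_nil_iff.mpr
      intro col _
      rw [if_neg (by tauto)]
  simp only [hinner]
  rw [range_flatMap_ite R n0
    (fun (row : Nat) => if 0 ≤ n1 ∧ n1 < ((Ls.getD row 0 : Nat) : Int) then P8 (R : Int) (row : Int) n1 else [])]
  show _ = (if 0 ≤ n0 ∧ n0 < (R : Int) ∧ 0 ≤ n1 ∧ n1 < ((Ls.getD n0.toNat 0 : Nat) : Int)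
    then P8 (R : Int) n0 n1 else [])
  by_cases ha : 0 ≤ n0 ∧ n0 < (R : Int)
  · rw [if_pos ha, Int.toNat_of_nonneg ha.1]
    by_cases hb : 0 ≤ n1 ∧ n1 < ((Ls.getD n0.toNat 0 : Nat) : Int)
    · rw [if_pos hb, if_pos (by tauto)]
    · rw [if_neg hb, if_neg (by tauto)]
  · rw [if_neg ha, if_neg (by tauto)]

-- the two ports agree on every input (the raising runs of Python A are outside Pre_)
lemma calc_eq (axis t0 : List (List Int)) : calculate axis t0 = calculate_alt axis t0 := by
  have hLsR : (t0.map List.length).length = t0.length := List.length_map ..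
  -- A as one bump list
  have hA : calculate axis t0
      = bumps ((List.range t0.length).flatMap (GA t0.length (t0.map List.length) axis)) t0 := by
    unfold calculate
    have hag : ∀ (b : List (List Int)) (row : Nat), row ∈ List.range t0.length →
        b.map List.length = t0.map List.length →
        (List.range ((b.getD row []).length)).foldl
          (fun t col => axis.foldl (fun t num => stepA t row col num) t) b
          = bumps (GA t0.length (t0.map List.length) axis row) b := by
      intro b row hr hb
      exact colfold_eq axis row t0.length (t0.map List.length) hLsR (List.mem_range.mp hr) b hb
    rw [foldl_congr_inv _ _ (fun t row => bumps (GA t0.length (t0.map List.length) axis row) t)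
        (fun t => t.map List.length = t0.map List.length)
        (fun b a ha hb => by rw [hag b a ha hb]; exact (shape_bumps _ _).trans hb)
        hag t0 rfl]
    rw [foldl_bumps]
  -- B as one bump list
  have hB : calculate_alt axis t0
      = bumps (axis.flatMap (QB t0.length (t0.map List.length))) t0 := by
    unfold calculate_alt
    have hag : ∀ (b : List (List Int)) (num : List Int), num ∈ axis →
        b.map List.length = t0.map List.length →
        (match num with
          | n0 :: n1 :: _ =>
            if 0 ≤ n0 ∧ n0 < (t0.length : Int) ∧ 0 ≤ n1 ∧ n1 < ((b.getD n0.toNat []).length : Int) then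
              offsetsB.foldl (stepB (t0.length : Int) n0 n1) b
            else b
          | _ => b)
          = bumps (QB t0.length (t0.map List.length) num) b := by
      intro b num _ hIb
      rcases num with _ | ⟨n0, rest⟩
      · rfl
      rcases rest with _ | ⟨n1, rest⟩
      · rfl
      show (if 0 ≤ n0 ∧ n0 < (t0.length : Int) ∧ 0 ≤ n1 ∧ n1 < ((b.getD n0.toNat []).length : Int) then
              offsetsB.foldl (stepB (t0.length : Int) n0 n1) b
            else b)
          = bumps (QB t0.length (t0.map List.length) (n0 :: n1 :: rest)) b
      rw [rowlen_of_shape hIb n0.toNat]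
      show _ = bumps (if 0 ≤ n0 ∧ n0 < (t0.length : Int) ∧ 0 ≤ n1 ∧
          n1 < (((t0.map List.length).getD n0.toNat 0 : Nat) : Int)
        then P8 (t0.length : Int) n0 n1 else []) b
      by_cases hc : 0 ≤ n0 ∧ n0 < (t0.length : Int) ∧ 0 ≤ n1 ∧
          n1 < (((t0.map List.length).getD n0.toNat 0 : Nat) : Int)
      · rw [if_pos hc, if_pos hc, stepB_fold_eq]
      · rw [if_neg hc, if_neg hc]
        rfl
    rw [foldl_congr_inv _ _
        (fun t num => bumps (QB t0.length (t0.map List.length) num) t)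
        (fun t => t.map List.length = t0.map List.length)
        (fun b a ha hb => by rw [hag b a ha hb]; exact (shape_bumps _ _).trans hb)
        hag t0 rfl]
    rw [foldl_bumps]
  -- exchange the iteration orders: same multiset of bumps
  have step1 : ((List.range t0.length).flatMap (GA t0.length (t0.map List.length) axis)).Perm
      ((List.range t0.length).flatMap (fun row => axis.flatMap (fun num =>
        (List.range ((t0.map List.length).getD row 0)).flatMap
          (fun col => fI (t0.length : Int) row col num)))) :=
    List.Perm.flatMap (List.Perm.refl _)
      (fun row _ => flatMap_swap_perm _ axis (fun col num => fI (t0.length : Int) row col num))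
  have step2 : ((List.range t0.length).flatMap (fun row => axis.flatMap (fun num =>
      (List.range ((t0.map List.length).getD row 0)).flatMap
        (fun col => fI (t0.length : Int) row col num)))).Perm
      (axis.flatMap (fun num => (List.range t0.length).flatMap (fun row =>
        (List.range ((t0.map List.length).getD row 0)).flatMap
          (fun col => fI (t0.length : Int) row col num)))) :=
    flatMap_swap_perm _ axis _
  have step3 : (axis.flatMap (fun num => (List.range t0.length).flatMap (fun row =>
      (List.range ((t0.map List.length).getD row 0)).flatMap
        (fun col => fI (t0.length : Int) row col num))))
      = axis.flatMap (QB t0.length (t0.map List.length)) :=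
    List.flatMap_congr (fun num _ => collapse_num t0.length (t0.map List.length) num)
  have hperm : ((List.range t0.length).flatMap (GA t0.length (t0.map List.length) axis)).Perm
      (axis.flatMap (QB t0.length (t0.map List.length))) := by
    rw [← step3]
    exact step1.trans step2
  rw [hA, hB]
  exact List.Perm.foldl_eq
    (rcomm := ⟨fun t p q => bump_comm t p.1 p.2 q.1 q.2⟩) hperm t0

-- ===== VERDICT (by name: the statement is the Claim_ definition above) =====
theorem calculate_spec : Claim_equal_calculate := by
  intro axis t _ _
  unfold Spec_calculate
  exact calc_eq axis t
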